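-- pv_equiv track=rewrite | github.com/MuhamadZaki/Logika_Python | main.py | find_linked_pairs
-- ===== SOURCE A (Python) =====
-- def are_linked(word1, word2):
--
--     #Fungsi ini memeriksa apakah dua kata saling bertautan
--
--     if len(word1) != len(word2):
--         # Jika panjang kata tidak sama, tidak mungkin saling bertautan
--         return False
--     # Inisialisasi string kosong untuk menyimpan hasil penggabungan huruf
--     linked_word = ""
--     for char1, char2 in zip(word1, word2):
--         # Menggabungkan huruf bergantian dari kedua kata
--         linked_word += char1 + char2
--     return linked_word
--
-- def find_linked_pairs(words):
--
--     # Fungsi ini menemukan semua pasangan kata yang saling bertautan dalam daftar kata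
--
--     # Inisialisasi list untuk menyimpan pasangan kata yang saling bertautan
--     linked_pairs = []
--     for i in range(len(words)):
--         for j in range(i+1, len(words)):
--             # Memeriksa apakah dua kata saling bertautan
--             linked_word = are_linked(words[i], words[j])
--             if linked_word:
--                 # Menambahkan pasangan kata yang saling bertautan ke dalam list
--                 linked_pairs.append((words[i], words[j], linked_word))
--     return linked_pairs
-- ===== SOURCE B (Python) =====
-- def find_linked_pairs(words):
--     # Bucket word indices by length (skipping empty words), then for each word
--     # only scan its own length-bucket instead of every later word.
--     buckets = {}
--     for idx, w in enumerate(words):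
--         if w:
--             buckets.setdefault(len(w), []).append(idx)
--     linked_pairs = []
--     for i, w in enumerate(words):
--         if not w:
--             continue
--         for j in buckets[len(w)]:
--             if j > i:
--                 u = words[j]
--                 merged = "".join(a + b for a, b in zip(w, u))
--                 linked_pairs.append((w, u, merged))
--     return linked_pairs
-- ===== Notes on version B (the rewrite author's own statement) =====
-- stated objective: alternative
-- what changed: B builds a dict bucketing word indices by length in one pass and, for each word, scans only its own length-bucket for later indices, instead of A's nested scan over every pair of words; when many lengths differ B avoids the cross-length comparisons, but on outputs dominated by same-length pairs the cost is the same.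
import Mathlib
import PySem

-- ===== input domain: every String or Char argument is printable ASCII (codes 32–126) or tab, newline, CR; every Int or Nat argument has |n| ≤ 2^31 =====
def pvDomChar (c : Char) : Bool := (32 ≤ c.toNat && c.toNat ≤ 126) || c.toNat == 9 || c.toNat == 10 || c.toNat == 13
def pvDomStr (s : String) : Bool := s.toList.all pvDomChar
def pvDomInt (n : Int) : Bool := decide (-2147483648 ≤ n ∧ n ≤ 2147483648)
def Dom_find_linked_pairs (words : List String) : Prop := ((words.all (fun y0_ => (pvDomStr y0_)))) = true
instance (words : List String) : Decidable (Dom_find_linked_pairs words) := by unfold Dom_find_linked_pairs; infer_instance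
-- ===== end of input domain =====

-- B buckets word indices by length so each word is only compared with same-length words (alternative algorithm; same pairs in the same order).


-- ===== PORT A =====
-- Python's `linked_word += char1 + char2` is modeled over List Char (exact for str).
def are_linked (word1 word2 : String) : Option String :=
  if PySem.Str.len word1 ≠ PySem.Str.len word2 then none   -- Python returns False here
  else some (String.ofList ((word1.toList.zip word2.toList).foldl (fun acc p => acc ++ [p.1, p.2]) []))

def find_linked_pairs (words : List String) : List (String × String × String) :=
  (PySem.List.pyRange 0 (PySem.List.len words)).foldl (fun acc i =>
    (PySem.List.pyRange (i + 1) (PySem.List.len words)).foldl (fun acc j =>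
      match are_linked (PySem.List.pyGetD words i "") (PySem.List.pyGetD words j "") with
      | none => acc                                         -- `if linked_word:` — False is falsy
      | some s =>
        if s.toList ≠ [] then                               -- `if linked_word:` — "" is falsy
          acc ++ [(PySem.List.pyGetD words i "", PySem.List.pyGetD words j "", s)]
        else acc) acc) []

-- ===== PORT B =====
-- `"".join(a + b for a, b in zip(w, u))` of Source B
def pyInterleave (w u : String) : String :=
  String.ofList ((w.toList.zip u.toList).flatMap (fun q => [q.1, q.2]))

-- `buckets.setdefault(len(w), []).append(idx)` is Dict.modify with default [];
-- buckets are only ever read through getD, so dict key order is unobservable.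
def find_linked_pairs_alt (words : List String) : List (String × String × String) :=
  let buckets : PySem.Dict Int (List Int) :=
    (PySem.List.enumerate words).foldl (fun d p =>
      if p.2.toList ≠ [] then d.modify (PySem.Str.len p.2) [] (fun b => b ++ [p.1]) else d)
      PySem.Dict.empty
  (PySem.List.enumerate words).foldl (fun acc p =>
    if p.2.toList = [] then acc
    else (buckets.getD (PySem.Str.len p.2) []).foldl (fun acc j =>
      if p.1 < j then
        acc ++ [(p.2, PySem.List.pyGetD words j "", pyInterleave p.2 (PySem.List.pyGetD words j ""))]
      else acc) acc) []

-- ===== PRECONDITION & SPEC =====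
def Spec_find_linked_pairs (words : List String) (out : List (String × String × String)) : Prop := out = find_linked_pairs_alt words
instance (words : List String) (out : List (String × String × String)) : Decidable (Spec_find_linked_pairs words out) := by unfold Spec_find_linked_pairs; infer_instance

-- ===== CLAIM (what is proved, stated in full; the proofs are below) =====
def Claim_equal_find_linked_pairs : Prop := ∀ (words : List String), Dom_find_linked_pairs words → Spec_find_linked_pairs words (find_linked_pairs words)

-- ===== LEMMAS AND PROOFS =====

-- the word at index i (loop indices always lie in range(len(words)), so the default is never used)
def pvW (words : List String) (i : Int) : String := PySem.List.pyGetD words i ""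

def pvCond (words : List String) (i j : Int) : Bool :=
  decide ((pvW words i).toList.length = (pvW words j).toList.length ∧ (pvW words i).toList ≠ [])

def pvF (words : List String) (i j : Int) : String × String × String :=
  (pvW words i, pvW words j, pyInterleave (pvW words i) (pvW words j))

-- common canonical form of both programs
def pvCanon (words : List String) : List (String × String × String) :=
  (PySem.List.pyRange 0 (PySem.List.len words)).flatMap (fun i =>
    ((PySem.List.pyRange (i + 1) (PySem.List.len words)).filter (pvCond words i)).map (pvF words i))

-- B's bucket dictionary, as a standalone definition (definitionally the `let buckets` of the port)
def pvBuckets (words : List String) : PySem.Dict Int (List Int) :=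
  (PySem.List.enumerate words).foldl (fun d p =>
    if p.2.toList ≠ [] then d.modify (PySem.Str.len p.2) [] (fun b => b ++ [p.1]) else d)
    PySem.Dict.empty

theorem pvInterleave_toList (w u : String) :
    (pyInterleave w u).toList = (w.toList.zip u.toList).flatMap (fun q => [q.1, q.2]) := by
  unfold pyInterleave; exact String.toList_ofList

theorem pvInterleave_ne_nil_iff (w u : String) (h : w.toList.length = u.toList.length) :
    (pyInterleave w u).toList ≠ [] ↔ w.toList ≠ [] := by
  rw [pvInterleave_toList]
  constructor
  · intro hne hw
    apply hne
    rw [List.flatMap_eq_nil_iff]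
    intro p hp
    rw [hw] at hp; simp at hp
  · intro hw hnil
    rw [List.flatMap_eq_nil_iff] at hnil
    have hz : w.toList.zip u.toList ≠ [] := by
      intro hzz
      rcases List.zip_eq_nil_iff.mp hzz with h1 | h1
      · exact hw h1
      · exact hw (List.length_eq_zero_iff.mp (by rw [h, h1]; rfl))
    rcases List.exists_mem_of_ne_nil _ hz with ⟨p, hp⟩
    exact absurd (hnil p hp) (by simp)

theorem pvA_eq_canon (words : List String) : find_linked_pairs words = pvCanon words := by
  unfold find_linked_pairs pvCanon
  rw [PySem.List.foldl_congr_mem _ _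
    (fun acc i => acc ++ ((PySem.List.pyRange (i + 1) (PySem.List.len words)).filter (pvCond words i)).map (pvF words i)) _ ?_]
  · exact PySem.List.foldl_append_eq_flatMap _ _ _
  · intro acc i _
    rw [PySem.List.foldl_congr_mem _ _
      (fun acc j => if pvCond words i j = true then acc ++ [pvF words i j] else acc) _ ?_]
    · exact PySem.List.foldl_append_if _ _ _ _
    · intro acc2 j _
      show (match are_linked (pvW words i) (pvW words j) with
            | none => acc2
            | some s => if s.toList ≠ [] then acc2 ++ [(pvW words i, pvW words j, s)] else acc2)
          = if pvCond words i j = true then acc2 ++ [pvF words i j] else acc2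
      unfold are_linked pvCond pvF
      by_cases hlen : (pvW words i).toList.length = (pvW words j).toList.length
      · have hl : ¬ PySem.Str.len (pvW words i) ≠ PySem.Str.len (pvW words j) := by
          rw [PySem.Str.len_eq, PySem.Str.len_eq]
          exact not_ne_iff.mpr (by exact_mod_cast hlen)
        rw [if_neg hl]
        have hs : String.ofList (((pvW words i).toList.zip (pvW words j).toList).foldl
            (fun acc p => acc ++ [p.1, p.2]) []) = pyInterleave (pvW words i) (pvW words j) := by
          unfold pyInterleave
          rw [PySem.List.foldl_append_eq_flatMap (fun (p : Char × Char) => [p.1, p.2]),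
              List.nil_append]
        simp only [hs]
        by_cases hw : (pvW words i).toList = []
        · rw [if_neg (by simpa [pvInterleave_ne_nil_iff _ _ hlen] using hw),
              if_neg (by simp only [decide_eq_true_eq, not_and, not_not]; exact fun _ => hw)]
        · rw [if_pos (by simpa [pvInterleave_ne_nil_iff _ _ hlen] using hw),
              if_pos (by simp only [decide_eq_true_eq]; exact ⟨hlen, hw⟩)]
      · rw [if_pos (by rw [PySem.Str.len_eq, PySem.Str.len_eq]
                       exact fun h => hlen (by exact_mod_cast h)),
            if_neg (by simp only [decide_eq_true_eq]; exact fun h => hlen h.1)]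

theorem pvBucket_spec (words : List String) (L : Int) :
    (pvBuckets words).getD L []
    = ((PySem.List.enumerate words).filter
        (fun p => (PySem.Str.len p.2 == L) && decide (p.2.toList ≠ []))).map (fun p => p.1) := by
  unfold pvBuckets
  have h1 : (fun (d : PySem.Dict Int (List Int)) (p : Int × String) =>
      if p.2.toList ≠ [] then d.modify (PySem.Str.len p.2) [] (fun b => b ++ [p.1]) else d)
    = fun d p => if (decide (p.2.toList ≠ [])) = true then
        d.modify (PySem.Str.len p.2) [] (fun b => b ++ [p.1]) else d := by
    funext d p; simp
  rw [h1, ← List.foldl_filter]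
  have h2 : ((PySem.List.enumerate words).filter (fun p => decide (p.2.toList ≠ []))).foldl
      (fun d p => d.modify (PySem.Str.len p.2) [] (fun b => b ++ [p.1])) PySem.Dict.empty
    = (((PySem.List.enumerate words).filter (fun p => decide (p.2.toList ≠ []))).map
        (fun p => ((PySem.Str.len p.2, p.1) : Int × Int))).foldl
        (fun d q => d.modify q.1 [] (fun b => b ++ [q.2])) PySem.Dict.empty := by
    rw [List.foldl_map]
  rw [h2, PySem.Dict.getD_foldl_modify_append, PySem.Dict.getD_empty]
  rw [List.filter_map, List.filter_filter]
  simp [Function.comp]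

-- A filter over range(0, n) whose predicate forces i < j equals the matching filter over range(i+1, n)
theorem pvFilterRangeSplit (n i : Int) (hi0 : 0 ≤ i) (hin : i < n) (P Q : Int → Bool)
    (hP : ∀ j, ¬ i < j → P j = false) (hQ : ∀ j, i < j → P j = Q j) :
    (PySem.List.pyRange 0 n).filter P = (PySem.List.pyRange (i + 1) n).filter Q := by
  rw [PySem.List.pyRange_one_append 0 (i + 1) n (by omega) (by omega), List.filter_append]
  rw [List.filter_eq_nil_iff.mpr ?_, List.nil_append]
  · exact List.filter_congr (fun j hj => hQ j (by
      rcases PySem.List.mem_pyRange_one.mp hj with ⟨h1, _⟩; omega))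
  · intro j hj
    rcases PySem.List.mem_pyRange_one.mp hj with ⟨_, h2⟩
    rw [hP j (by omega)]
    simp

theorem pvB_eq_canon (words : List String) : find_linked_pairs_alt words = pvCanon words := by
  have hB : find_linked_pairs_alt words =
      (PySem.List.enumerate words).foldl (fun acc p =>
        if p.2.toList = [] then acc
        else ((pvBuckets words).getD (PySem.Str.len p.2) []).foldl (fun acc j =>
          if p.1 < j then
            acc ++ [(p.2, PySem.List.pyGetD words j "", pyInterleave p.2 (PySem.List.pyGetD words j ""))]
          else acc) acc) [] := rfl
  rw [hB]
  rw [PySem.List.foldl_congr_mem _ _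
    (fun acc (p : Int × String) => acc ++ (if p.2.toList = [] then [] else
      ((((pvBuckets words).getD (PySem.Str.len p.2) []).filter (fun j => decide (p.1 < j))).map
        (fun j => (p.2, pvW words j, pyInterleave p.2 (pvW words j)))))) _ ?_]
  · rw [PySem.List.foldl_append_eq_flatMap, List.nil_append]
    rw [PySem.List.enumerate_eq_map_pyRange words "", List.flatMap_map]
    unfold pvCanon
    rw [List.flatMap_def, List.flatMap_def]
    apply congrArg
    apply List.map_congr_left
    intro i hi
    rcases PySem.List.mem_pyRange_one.mp hi with ⟨hi0, hin⟩
    by_cases hw : (PySem.List.pyGetD words i "").toList = []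
    · rw [if_pos hw]
      rw [(List.filter_eq_nil_iff).mpr ?_, List.map_nil]
      intro j _
      simp [pvCond, pvW, hw]
    · rw [if_neg hw]
      rw [pvBucket_spec, List.filter_map, List.map_map, List.filter_filter,
          PySem.List.enumerate_eq_map_pyRange words "", List.filter_map, List.map_map]
      rw [pvFilterRangeSplit (PySem.List.len words) i hi0 hin _ (pvCond words i) ?_ ?_]
      · exact List.map_congr_left (fun j _ => rfl)
      · intro j hj
        simp only [Function.comp, Bool.and_eq_false_iff]
        left
        simpa using hj
      · intro j hij
        simp only [Function.comp, pvCond, pvW, PySem.Str.len_eq]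
        rw [Bool.eq_iff_iff]
        simp only [Bool.and_eq_true, decide_eq_true_eq, beq_iff_eq, Nat.cast_inj]
        constructor
        · rintro ⟨_, hlen, _⟩
          exact ⟨hlen.symm, hw⟩
        · rintro ⟨hlen, _⟩
          refine ⟨hij, hlen.symm, ?_⟩
          intro hj0
          apply hw
          apply List.length_eq_zero_iff.mp
          rw [hlen, hj0]; rfl
  · intro acc p _
    beta_reduce
    by_cases hp : p.2.toList = []
    · rw [if_pos hp, if_pos hp, List.append_nil]
    · rw [if_neg hp, if_neg hp]
      exact PySem.List.foldl_append_ite (fun j => p.1 < j)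
        (fun j => (p.2, PySem.List.pyGetD words j "", pyInterleave p.2 (PySem.List.pyGetD words j "")))
        ((pvBuckets words).getD (PySem.Str.len p.2) []) acc

-- ===== VERDICT (by name: the statement is the Claim_ definition above) =====
theorem find_linked_pairs_spec : Claim_equal_find_linked_pairs := by
  intro words _
  unfold Spec_find_linked_pairs
  rw [pvA_eq_canon, pvB_eq_canon]
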